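-- pv_equiv track=rewrite | github.com/NaamaMika/boss-sniffer | step2_manager.py | indexs_in_agents
-- ===== SOURCE A (Python) =====
-- def indexs_in_agents(update_html_code):
--     """Return two indexs that will help to set the incoming agent information
--     :param update_html_code: html code
--     :return: two indexs
--     """
--     index_keys = 0
--     index_values = 0
--     for i in range(len(update_html_code)):
--         if "labels: %%AGENTS_IN_KEYS%%" in update_html_code[i]:
--             index_keys = i
--         if "data: %%AGENTS_IN_VALUES%%" in update_html_code[i]:
--             index_values = i
--     return index_keys, index_values
-- ===== SOURCE B (Python) =====
-- def indexs_in_agents(update_html_code):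
--     """Return two indexs that will help to set the incoming agent information
--     (backward scan: first match from the end is the last occurrence)."""
--     index_keys = 0
--     index_values = 0
--     found_keys = False
--     found_values = False
--     for i in range(len(update_html_code) - 1, -1, -1):
--         line = update_html_code[i]
--         if not found_keys and "labels: %%AGENTS_IN_KEYS%%" in line:
--             index_keys = i
--             found_keys = True
--         if not found_values and "data: %%AGENTS_IN_VALUES%%" in line:
--             index_values = i
--             found_values = True
--         if found_keys and found_values:
--             break
--     return index_keys, index_values
-- ===== Notes on version B (the rewrite author's own statement) =====
-- stated objective: alternative
-- what changed: B scans the lines from the end toward the start with found-flags and breaks as soon as both markers are located, instead of A's full forward pass that keeps overwriting the indexes.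
import Mathlib
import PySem

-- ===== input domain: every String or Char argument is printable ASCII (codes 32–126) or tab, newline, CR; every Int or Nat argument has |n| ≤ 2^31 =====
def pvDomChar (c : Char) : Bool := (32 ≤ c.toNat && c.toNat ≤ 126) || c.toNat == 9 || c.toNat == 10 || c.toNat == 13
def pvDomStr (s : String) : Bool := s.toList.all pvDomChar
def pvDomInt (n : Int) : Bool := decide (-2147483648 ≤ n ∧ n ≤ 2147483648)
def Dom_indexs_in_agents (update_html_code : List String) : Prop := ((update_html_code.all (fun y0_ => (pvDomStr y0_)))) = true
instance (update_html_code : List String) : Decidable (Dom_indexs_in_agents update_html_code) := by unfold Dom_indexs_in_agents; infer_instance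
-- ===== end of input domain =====

-- B scans backwards with found-flags and an early break instead of A's full forward overwrite pass (objective: alternative).

-- ===== PORT A =====
-- forward pass over range(len), overwriting each index on every match
def indexs_in_agents (update_html_code : List String) : Int × Int :=
  (PySem.List.pyRange 0 (update_html_code.length : Int) 1).foldl
    (fun (st : Int × Int) i =>
      let line := PySem.List.pyGetD update_html_code i ""
      let ik := if PySem.Str.isIn "labels: %%AGENTS_IN_KEYS%%" line then i else st.1
      let iv := if PySem.Str.isIn "data: %%AGENTS_IN_VALUES%%" line then i else st.2
      (ik, iv)) (0, 0)

-- ===== PORT B =====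
-- backward loop: i counts the index+1 down to 0; flags record which marker is found; break when both are
def pvAltGo (xs : List String) : Nat → (Int × Bool) → (Int × Bool) → Int × Int
  | 0, (ik, _), (iv, _) => (ik, iv)
  | Nat.succ i, (ik, fk), (iv, fv) =>
    let line := PySem.List.pyGetD xs (i : Int) ""
    let sk := if !fk && PySem.Str.isIn "labels: %%AGENTS_IN_KEYS%%" line then ((i : Int), true) else (ik, fk)
    let sv := if !fv && PySem.Str.isIn "data: %%AGENTS_IN_VALUES%%" line then ((i : Int), true) else (iv, fv)
    if sk.2 && sv.2 then (sk.1, sv.1) else pvAltGo xs i sk sv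

def indexs_in_agents_alt (update_html_code : List String) : Int × Int :=
  pvAltGo update_html_code update_html_code.length (0, false) (0, false)

-- ===== PRECONDITION & SPEC =====
def Spec_indexs_in_agents (update_html_code : List String) (out : Int × Int) : Prop := out = indexs_in_agents_alt update_html_code
instance (update_html_code : List String) (out : Int × Int) : Decidable (Spec_indexs_in_agents update_html_code out) := by unfold Spec_indexs_in_agents; infer_instance

-- ===== CLAIM (what is proved, stated in full; the proofs are below) =====
def Claim_equal_indexs_in_agents : Prop := ∀ (update_html_code : List String), Dom_indexs_in_agents update_html_code → Spec_indexs_in_agents update_html_code (indexs_in_agents update_html_code)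

-- ===== LEMMAS AND PROOFS =====

-- last index i < n whose line satisfies p, defaulting to 0
def pvLastIdx (p : String → Bool) (xs : List String) : Nat → Int
  | 0 => 0
  | Nat.succ n => if p (PySem.List.pyGetD xs (n : Int) "") then (n : Int) else pvLastIdx p xs n

def pK (line : String) : Bool := PySem.Str.isIn "labels: %%AGENTS_IN_KEYS%%" line
def pV (line : String) : Bool := PySem.Str.isIn "data: %%AGENTS_IN_VALUES%%" line

lemma pvA_eq (xs : List String) (n : Nat) :
    (PySem.List.pyRange 0 (n : Int) 1).foldl
      (fun (st : Int × Int) i =>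
        let line := PySem.List.pyGetD xs i ""
        let ik := if PySem.Str.isIn "labels: %%AGENTS_IN_KEYS%%" line then i else st.1
        let iv := if PySem.Str.isIn "data: %%AGENTS_IN_VALUES%%" line then i else st.2
        (ik, iv)) (0, 0)
      = (pvLastIdx pK xs n, pvLastIdx pV xs n) := by
  induction n with
  | zero => simp [PySem.List.pyRange_one_eq_nil (by omega : (0:Int) ≤ 0), pvLastIdx]
  | succ n ih =>
    have h : ((n + 1 : Nat) : Int) = (n : Int) + 1 := by push_cast; ring
    rw [h, PySem.List.pyRange_one_succ_right (by positivity : (0:Int) ≤ (n : Int)),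
        List.foldl_append, ih]
    simp [pvLastIdx, pK, pV]

lemma pvB_eq (xs : List String) (n : Nat) (ik iv : Int) (fk fv : Bool)
    (hik : fk = false → ik = 0) (hiv : fv = false → iv = 0) :
    pvAltGo xs n (ik, fk) (iv, fv)
      = ((if fk then ik else pvLastIdx pK xs n), (if fv then iv else pvLastIdx pV xs n)) := by
  induction n generalizing ik iv fk fv with
  | zero =>
    cases fk <;> cases fv <;>
      simp_all [pvAltGo, pvLastIdx]
  | succ n ih =>
    rw [pvAltGo]
    by_cases hk : pK (PySem.List.pyGetD xs (n : Int) "") <;>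
      by_cases hv : pV (PySem.List.pyGetD xs (n : Int) "") <;>
      simp only [pK, pV] at hk hv <;>
      simp at hk hv <;>
      cases fk <;> cases fv <;>
      simp_all [pvLastIdx, pK, pV]

-- ===== VERDICT (by name: the statement is the Claim_ definition above) =====
theorem indexs_in_agents_spec : Claim_equal_indexs_in_agents := by
  intro xs _
  unfold Spec_indexs_in_agents indexs_in_agents indexs_in_agents_alt
  rw [pvA_eq, pvB_eq _ _ _ _ _ _ (fun _ => rfl) (fun _ => rfl)]
  simp
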